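-- pv_equiv track=rewrite | github.com/miloswrath/fmri-slice-time-correction | code/fmriPrep.py | split_job_scripts
-- ===== SOURCE A (Python) =====
-- def split_job_scripts(job_scripts):
--     job_scripts1 = []
--     job_scripts2 = []
--     job_scripts3 = []
--     job_scripts4 = []
--
--     for script in job_scripts:
--         if 'day1pre' in script:
--             job_scripts1.append(script)
--         elif 'day1post' in script:
--             job_scripts2.append(script)
--         elif 'day2pre' in script:
--             job_scripts3.append(script)
--         elif 'day2post' in script:
--             job_scripts4.append(script)
--     return job_scripts1, job_scripts2, job_scripts3, job_scripts4
-- ===== SOURCE B (Python) =====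
-- def split_job_scripts(job_scripts):
--     def bucket(key, earlier):
--         return [s for s in job_scripts
--                 if key in s and not any(e in s for e in earlier)]
--     return (bucket('day1pre', []),
--             bucket('day1post', ['day1pre']),
--             bucket('day2pre', ['day1pre', 'day1post']),
--             bucket('day2post', ['day1pre', 'day1post', 'day2pre']))
-- ===== Notes on version B (the rewrite author's own statement) =====
-- stated objective: alternative
-- what changed: Replaces A's single pass maintaining four accumulator lists through an elif cascade with four independent filter passes: each bucket is the filter of the whole input by 'its key matches and no earlier key matches', which is correct because first-match priority is an input-only predicate per script.
import Mathlib
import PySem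

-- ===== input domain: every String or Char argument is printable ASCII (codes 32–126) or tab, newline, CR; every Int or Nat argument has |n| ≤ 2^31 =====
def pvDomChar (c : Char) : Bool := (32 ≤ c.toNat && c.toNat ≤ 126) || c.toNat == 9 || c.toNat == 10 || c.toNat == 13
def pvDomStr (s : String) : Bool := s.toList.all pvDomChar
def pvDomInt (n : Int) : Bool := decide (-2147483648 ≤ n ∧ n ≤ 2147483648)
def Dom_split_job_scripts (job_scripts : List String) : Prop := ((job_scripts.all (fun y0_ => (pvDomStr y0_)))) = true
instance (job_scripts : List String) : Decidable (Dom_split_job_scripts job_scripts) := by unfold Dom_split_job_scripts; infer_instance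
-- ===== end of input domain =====

-- B replaces A's single accumulating pass (elif cascade over four lists) by four independent
-- filter passes, one per bucket, each keyed by "its substring matches and no earlier one does".
-- Same asymptotic cost; a different traversal/decomposition, not a speedup.

-- ===== PORT A =====
-- A's loop body: the elif cascade over the four-list state
def pvStepA (st : List String × List String × List String × List String) (script : String) :
    List String × List String × List String × List String :=
  let (j1, j2, j3, j4) := st
  if PySem.Str.isIn "day1pre" script then (j1 ++ [script], j2, j3, j4)
  else if PySem.Str.isIn "day1post" script then (j1, j2 ++ [script], j3, j4)
  else if PySem.Str.isIn "day2pre" script then (j1, j2, j3 ++ [script], j4)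
  else if PySem.Str.isIn "day2post" script then (j1, j2, j3, j4 ++ [script])
  else (j1, j2, j3, j4)

def split_job_scripts (job_scripts : List String) : List String × List String × List String × List String :=
  job_scripts.foldl pvStepA ([], [], [], [])

-- ===== PORT B =====
def pvBucket (job_scripts : List String) (key : String) (earlier : List String) : List String :=
  job_scripts.filter
    (fun s => PySem.Str.isIn key s && !(earlier.any (fun e => PySem.Str.isIn e s)))

def split_job_scripts_alt (job_scripts : List String) : List String × List String × List String × List String :=
  (pvBucket job_scripts "day1pre" [],
   pvBucket job_scripts "day1post" ["day1pre"],
   pvBucket job_scripts "day2pre" ["day1pre", "day1post"],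
   pvBucket job_scripts "day2post" ["day1pre", "day1post", "day2pre"])

-- ===== PRECONDITION & SPEC =====
def Spec_split_job_scripts (job_scripts : List String) (out : List String × List String × List String × List String) : Prop := out = split_job_scripts_alt job_scripts
instance (job_scripts : List String) (out : List String × List String × List String × List String) : Decidable (Spec_split_job_scripts job_scripts out) := by unfold Spec_split_job_scripts; infer_instance

-- ===== CLAIM (what is proved, stated in full; the proofs are below) =====
def Claim_equal_split_job_scripts : Prop := ∀ (job_scripts : List String), Dom_split_job_scripts job_scripts → Spec_split_job_scripts job_scripts (split_job_scripts job_scripts)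

-- ===== LEMMAS AND PROOFS =====

-- A's fold from an arbitrary start state appends exactly B's four filtered buckets
lemma pv_fold_buckets (xs : List String) (l1 l2 l3 l4 : List String) :
    xs.foldl pvStepA (l1, l2, l3, l4)
    = (l1 ++ pvBucket xs "day1pre" [],
       l2 ++ pvBucket xs "day1post" ["day1pre"],
       l3 ++ pvBucket xs "day2pre" ["day1pre", "day1post"],
       l4 ++ pvBucket xs "day2post" ["day1pre", "day1post", "day2pre"]) := by
  induction xs generalizing l1 l2 l3 l4 with
  | nil => simp [pvBucket]
  | cons x xs ih =>
    by_cases h1 : PySem.Str.isIn "day1pre" x <;>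
    by_cases h2 : PySem.Str.isIn "day1post" x <;>
    by_cases h3 : PySem.Str.isIn "day2pre" x <;>
    by_cases h4 : PySem.Str.isIn "day2post" x <;>
      simp only [List.foldl_cons, pvStepA, h1, h2, h3, h4, if_true, if_false,
        Bool.false_eq_true, ite_true, ite_false, eq_self_iff_true] <;>
      rw [ih] <;>
      simp only [pvBucket, List.filter_cons, List.any_cons, List.any_nil,
        h1, h2, h3, h4, Bool.or_false, Bool.not_true, Bool.not_false,
        Bool.and_true, Bool.and_false, Bool.true_and, Bool.false_and,
        Bool.true_or, Bool.false_or, Bool.false_eq_true,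
        ite_true, ite_false, List.append_assoc, List.singleton_append,
        List.append_nil, List.nil_append]
-- ===== VERDICT (by name: the statement is the Claim_ definition above) =====
theorem split_job_scripts_spec : Claim_equal_split_job_scripts := by
  intro xs _
  show split_job_scripts xs = split_job_scripts_alt xs
  unfold split_job_scripts split_job_scripts_alt
  rw [pv_fold_buckets]
  simp
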